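-- pv_equiv track=rewrite | github.com/nikfuzz/DataStructures_Algorithms | heaps/Product_of_3.py | solve
-- ===== SOURCE A (Python) =====
-- import heapq
--
-- def solve(a):
--     # if length is less than 3 then we just return an arr of -1s
--     if len(a) < 3:
--         return [-1]*len(a)
--     heap = []
--     res = []
--     pro = a[0]*a[1]*a[2]
--     heapq.heappush(heap,a[0])
--     res.append(-1)
--     heapq.heappush(heap,a[1])
--     res.append(-1)
--     heapq.heappush(heap,a[2])
--     res.append(pro)
--     for i in range(3,len(a)):
--         if a[i] > heap[0] and len(heap)>=3:
--             pro = res[-1]//heap[0]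
--             heapq.heappushpop(heap,a[i])
--             pro *= a[i]
--             res.append(pro)
--         else:
--             res.append(res[-1])
--     return res
-- ===== SOURCE B (Python) =====
-- def solve(a):
--     n = len(a)
--     if n < 3:
--         return [-1] * n
--     t0, t1, t2 = sorted(a[:3])
--     res = [-1, -1, t0 * t1 * t2]
--     for x in a[3:]:
--         if t0 < x:
--             if t2 <= x:
--                 t0, t1, t2 = t1, t2, x
--             elif t1 <= x:
--                 t0, t1, t2 = t1, x, t2
--             else:
--                 t0, t1, t2 = x, t1, t2
--         res.append(t0 * t1 * t2)
--     return res
-- ===== Notes on version B (the rewrite author's own statement) =====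
-- stated objective: simpler
-- what changed: B replaces the size-3 min-heap with three sorted variables holding the top-3 multiset and recomputes the product t0*t1*t2 each step, eliminating heapq and the running-product floor-division update (which is also what makes A raise ZeroDivisionError when the third-largest prefix element is zero and a larger element arrives).
import Mathlib
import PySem

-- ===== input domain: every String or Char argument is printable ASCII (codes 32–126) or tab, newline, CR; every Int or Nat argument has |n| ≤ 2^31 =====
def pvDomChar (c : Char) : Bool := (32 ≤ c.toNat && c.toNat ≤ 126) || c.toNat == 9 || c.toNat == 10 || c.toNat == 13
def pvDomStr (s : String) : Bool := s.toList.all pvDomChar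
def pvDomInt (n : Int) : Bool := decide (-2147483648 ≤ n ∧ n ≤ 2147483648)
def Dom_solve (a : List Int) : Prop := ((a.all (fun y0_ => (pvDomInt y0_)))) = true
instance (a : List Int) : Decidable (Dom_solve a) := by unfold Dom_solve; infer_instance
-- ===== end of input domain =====

-- B replaces A's size-3 heapq min-heap and running-product floor-division update by three sorted
-- variables holding the top-3 multiset, recomputing the product each step (objective: simpler).

-- ===== PORT A =====
-- Hand port of CPython's heapq._siftdown/_siftup/heappush/heappushpop (heapq is not in PySem).
-- Step for step; list indexing uses List.getD/List.set, exact because every index heapq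
-- touches is in range for the heaps solve builds (size ≤ 3).

-- _siftdown's while-loop; newitem = heap[pos] was read before the loop and is passed along
def siftdownAux (heap : List Int) (startpos pos : Nat) (newitem : Int) : List Int :=
  if startpos < pos then
    let parentpos := (pos - 1) / 2
    let parent := heap.getD parentpos 0
    if newitem < parent then
      siftdownAux (heap.set pos parent) startpos parentpos newitem
    else heap.set pos newitem
  else heap.set pos newitem
termination_by pos
decreasing_by omega

-- _siftup's while-loop, followed by heap[pos] = newitem; _siftdown(heap, startpos, pos)
def siftupAux (heap : List Int) (startpos pos endpos : Nat) (newitem : Int) : List Int :=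
  if 2 * pos + 1 < endpos then
    let childpos := 2 * pos + 1
    let rightpos := childpos + 1
    let childpos :=
      if rightpos < endpos ∧ ¬ (heap.getD childpos 0 < heap.getD rightpos 0) then rightpos
      else childpos
    siftupAux (heap.set pos (heap.getD childpos 0)) startpos childpos endpos newitem
  else
    siftdownAux (heap.set pos newitem) startpos pos newitem
termination_by endpos - pos
decreasing_by split <;> omega

def heappush (heap : List Int) (item : Int) : List Int :=
  siftdownAux (heap ++ [item]) 0 heap.length item

def heappushpop (heap : List Int) (item : Int) : List Int :=
  if heap ≠ [] ∧ heap.getD 0 0 < item then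
    -- item, heap[0] = heap[0], item; _siftup(heap, 0)  (the returned item is unused by solve)
    siftupAux (heap.set 0 item) 0 0 heap.length item
  else heap

-- the body of A's `for i in range(3, len(a))` loop; state = (heap, res)
def solveStep (a : List Int) (st : List Int × List Int) (i : Int) : List Int × List Int :=
  let heap := st.1
  let res := st.2
  if PySem.List.pyGetD heap 0 0 < PySem.List.pyGetD a i 0 ∧ 3 ≤ heap.length then
    let pro := PySem.Int.floordiv (PySem.List.pyGetD res (-1) 0) (PySem.List.pyGetD heap 0 0)
    let heap' := heappushpop heap (PySem.List.pyGetD a i 0)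
    (heap', res ++ [pro * PySem.List.pyGetD a i 0])
  else (heap, res ++ [PySem.List.pyGetD res (-1) 0])

def solve (a : List Int) : List Int :=
  if a.length < 3 then List.replicate a.length (-1)
  else
    let a0 := PySem.List.pyGetD a 0 0
    let a1 := PySem.List.pyGetD a 1 0
    let a2 := PySem.List.pyGetD a 2 0
    let pro := a0 * a1 * a2
    let heap := heappush (heappush (heappush [] a0) a1) a2
    let res : List Int := [-1, -1, pro]
    ((PySem.List.pyRange 3 a.length).foldl (solveStep a) (heap, res)).2

-- ===== PORT B =====
-- the update of (t0, t1, t2) by one element x (B's inner if-chain)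
def bupd (t0 t1 t2 x : Int) : Int × Int × Int :=
  if t0 < x then
    if t2 ≤ x then (t1, t2, x)
    else if t1 ≤ x then (t1, x, t2)
    else (x, t1, t2)
  else (t0, t1, t2)

-- the body of B's `for x in a[3:]` loop; state = ((t0,t1,t2), res)
def altStep (st : (Int × Int × Int) × List Int) (x : Int) : (Int × Int × Int) × List Int :=
  let t := bupd st.1.1 st.1.2.1 st.1.2.2 x
  (t, st.2 ++ [t.1 * t.2.1 * t.2.2])

def solve_alt (a : List Int) : List Int :=
  if a.length < 3 then List.replicate a.length (-1)
  else
    match PySem.List.sorted (a.take 3) (fun x => x) with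
    | t0 :: t1 :: t2 :: _ =>
      ((a.drop 3).foldl altStep ((t0, t1, t2), [-1, -1, t0 * t1 * t2])).2
    | _ => []   -- unreachable: sorted(a[:3]) has length 3 here

-- ===== PRECONDITION & SPEC =====
-- Pre_ excludes exactly the inputs on which A raises ZeroDivisionError in its running-product
-- floor division: those where for some i ≥ 3 the third-largest element of a[:i] is zero and a[i] is positive.
def Pre_solve (a : List Int) : Prop :=
  ∀ i ∈ List.range a.length, 3 ≤ i →
    (PySem.List.sorted (a.take i) (fun x => x)).getD (i - 3) 0 = 0 → a.getD i 0 ≤ 0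
instance (a : List Int) : Decidable (Pre_solve a) := by unfold Pre_solve; infer_instance

def pvWitness_solve : List Int := [3, 1, 2, 5, 0, -2, 4]

def Spec_solve (a : List Int) (out : List Int) : Prop := out = solve_alt a
instance (a : List Int) (out : List Int) : Decidable (Spec_solve a out) := by unfold Spec_solve; infer_instance

-- ===== CLAIM (what is proved, stated in full; the proofs are below) =====
def Claim_equal_solve : Prop := ∀ (a : List Int), Dom_solve a → Pre_solve a → Spec_solve a (solve a)

-- ===== LEMMAS AND PROOFS =====

-- one-step evaluation of the siftdown loop
lemma sd_stop (heap : List Int) (startpos pos : Nat) (n : Int) (h : ¬ startpos < pos) :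
    siftdownAux heap startpos pos n = heap.set pos n := by
  rw [siftdownAux]; simp [h]

-- heappush on heaps of size 0, 1, 2 (the only sizes solve pushes on), in closed form
lemma hp1 (x : Int) : heappush [] x = [x] := by
  simp only [heappush, List.nil_append, List.length_nil]
  rw [sd_stop _ _ _ _ (by omega)]; rfl

lemma hp2 (a x : Int) : heappush [a] x = if x < a then [x, a] else [a, x] := by
  simp only [heappush, List.cons_append, List.nil_append, List.length_cons, List.length_nil]
  rw [siftdownAux]
  norm_num [List.getD]
  by_cases h : x < a
  · rw [if_pos h, sd_stop _ _ _ _ (by omega)]; simp [h]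
  · rw [if_neg h]; simp [h]

lemma hp3 (a b x : Int) : heappush [a, b] x = if x < a then [x, b, a] else [a, b, x] := by
  simp only [heappush, List.cons_append, List.nil_append, List.length_cons, List.length_nil]
  rw [siftdownAux]
  norm_num [List.getD]
  by_cases h : x < a
  · rw [if_pos h, sd_stop _ _ _ _ (by omega)]; simp [h]
  · rw [if_neg h]; simp [h]

-- the heap after the three initial heappushes, in closed form
lemma heappush3 (a0 a1 a2 : Int) :
    heappush (heappush (heappush [] a0) a1) a2 =
      if a1 < a0 then (if a2 < a1 then [a2, a0, a1] else [a1, a0, a2])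
      else (if a2 < a0 then [a2, a1, a0] else [a0, a1, a2]) := by
  rw [hp1, hp2]
  by_cases h1 : a1 < a0
  · rw [if_pos h1, if_pos h1, hp3]
  · rw [if_neg h1, if_neg h1, hp3]

-- heappushpop on a 3-element heap, in closed form
lemma heappushpop3 (h0 h1 h2 x : Int) :
    heappushpop [h0, h1, h2] x =
      if h0 < x then
        (if h1 < h2 then (if x < h1 then [x, h1, h2] else [h1, x, h2])
         else (if x < h2 then [x, h1, h2] else [h2, h1, x]))
      else [h0, h1, h2] := by
  simp only [heappushpop, ne_eq, List.cons_ne_nil, not_false_eq_true, true_and, List.length_cons,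
    List.length_nil, List.getD, List.getElem?_cons_zero, Option.getD_some, List.set]
  by_cases hx : h0 < x
  · rw [if_pos hx, siftupAux]
    norm_num [List.getD]
    rw [if_pos hx]
    by_cases hc : h1 < h2
    · simp only [if_neg (show ¬ h2 ≤ h1 from by omega)]
      norm_num [List.getD]
      rw [siftupAux]
      norm_num [List.set, List.getD]
      rw [siftdownAux]
      norm_num [List.getD]
      by_cases h3 : x < h1
      · rw [if_pos h3, sd_stop _ _ _ _ (by omega)]
        simp only [List.set_cons_zero]
        rw [if_pos hc, if_pos h3]
      · rw [if_neg h3, if_pos hc, if_neg h3]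
    · simp only [if_pos (show h2 ≤ h1 from by omega)]
      norm_num [List.getD]
      rw [siftupAux]
      norm_num [List.set, List.getD]
      rw [siftdownAux]
      norm_num [List.getD]
      by_cases h3 : x < h2
      · rw [if_pos h3, sd_stop _ _ _ _ (by omega)]
        simp only [List.set_cons_zero]
        rw [if_neg hc, if_pos h3]
      · rw [if_neg h3, if_neg hc, if_neg h3]
  · rw [if_neg hx, if_neg hx]

-- sorted(l + [x]) is one ordered insertion into sorted(l)
lemma sorted_append_singleton (l : List Int) (x : Int) :
    PySem.List.sorted (l ++ [x]) (fun y => y) =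
      PySem.List.insertBy (fun a b => decide (a < b)) x (PySem.List.sorted l (fun y => y)) := by
  rw [PySem.List.sorted_eq_foldl_insertBy, PySem.List.sorted_eq_foldl_insertBy, List.foldl_append]
  rfl

-- inserting into a sorted list whose last three elements are [t0,t1,t2] only touches that tail
lemma drop_insertBy (x t0 t1 t2 : Int) :
    ∀ u : List Int, (u ++ [t0, t1, t2]).Pairwise (· ≤ ·) →
    (PySem.List.insertBy (fun a b => decide (a < b)) x (u ++ [t0, t1, t2])).drop (u.length + 1) =
      (if x < t0 then [t0, t1, t2]
       else if x < t1 then [x, t1, t2]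
       else if x < t2 then [t1, x, t2]
       else [t1, t2, x]) := by
  intro u
  induction u with
  | nil =>
    intro _
    simp only [List.nil_append, List.length_nil, Nat.zero_add, PySem.List.insertBy]
    split_ifs <;> simp_all
  | cons c u' ih =>
    intro hpw
    have hct0 : c ≤ t0 := (List.pairwise_cons.mp hpw).1 t0 (by simp)
    simp only [List.cons_append, PySem.List.insertBy, List.length_cons]
    by_cases hxc : x < c
    · simp only [hxc, decide_true, if_true]
      rw [if_pos (by omega : x < t0)]
      show (x :: c :: (u' ++ [t0,t1,t2])).drop (u'.length + 1 + 1) = [t0,t1,t2]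
      rw [List.drop_succ_cons, List.drop_succ_cons, List.drop_left]
    · simp only [hxc, decide_false, Bool.false_eq_true, if_false]
      rw [List.drop_succ_cons]
      exact ih hpw.of_cons

-- B's update, as a list, is that insertion tail; it stays sorted; its product drops t0 and gains x
lemma bupd_spec (t0 t1 t2 x : Int) (h01 : t0 ≤ t1) (h12 : t1 ≤ t2) :
    ([(bupd t0 t1 t2 x).1, (bupd t0 t1 t2 x).2.1, (bupd t0 t1 t2 x).2.2] =
      (if x < t0 then [t0, t1, t2]
       else if x < t1 then [x, t1, t2]
       else if x < t2 then [t1, x, t2]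
       else [t1, t2, x])) ∧
    (bupd t0 t1 t2 x).1 ≤ (bupd t0 t1 t2 x).2.1 ∧ (bupd t0 t1 t2 x).2.1 ≤ (bupd t0 t1 t2 x).2.2 ∧
    (t0 < x → (bupd t0 t1 t2 x).1 * (bupd t0 t1 t2 x).2.1 * (bupd t0 t1 t2 x).2.2 = t1 * t2 * x) := by
  unfold bupd; split_ifs <;> refine ⟨?_, ?_, ?_, fun _ => ?_⟩ <;> dsimp only <;>
    first
      | rfl
      | omega
      | ring
      | (simp only [List.cons.injEq, and_true]; omega)

-- A's heappushpop tracks B's update (heap is one of the two heap-shaped arrangements of the triple)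
lemma heappushpop_bupd (t0 t1 t2 x s0 s1 s2 : Int) (h12 : t1 ≤ t2)
    (hb : bupd t0 t1 t2 x = (s0, s1, s2)) (heap : List Int)
    (hh : heap = [t0, t1, t2] ∨ heap = [t0, t2, t1]) :
    heappushpop heap x = [s0, s1, s2] ∨ heappushpop heap x = [s0, s2, s1] := by
  unfold bupd at hb
  rcases hh with rfl | rfl <;>
    rw [heappushpop3] <;>
    split_ifs at hb ⊢ <;>
    simp only [Prod.mk.injEq] at hb <;>
    obtain ⟨rfl, rfl, rfl⟩ := hb <;>
    first
      | (left; rfl)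
      | (right; rfl)
      | (exfalso; omega)
      | (left; simp only [List.cons.injEq, and_true]; omega)

-- one step of the sorted-prefix invariant: the top-3 of a[:k+1] is bupd of the top-3 of a[:k]
lemma sorted_take_step (a : List Int) (k : Nat) (hk3 : 3 ≤ k) (hk : k < a.length)
    (t0 t1 t2 s0 s1 s2 : Int) (h01 : t0 ≤ t1) (h12 : t1 ≤ t2)
    (hs : (PySem.List.sorted (a.take k) (fun y => y)).drop (k - 3) = [t0, t1, t2])
    (hb : bupd t0 t1 t2 a[k] = (s0, s1, s2)) :
    (PySem.List.sorted (a.take (k + 1)) (fun y => y)).drop (k + 1 - 3) = [s0, s1, s2] := by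
  have htake : a.take (k + 1) = a.take k ++ [a[k]] := by
    rw [List.take_add_one, List.getElem?_eq_getElem hk]; rfl
  set S := PySem.List.sorted (a.take k) (fun y => y) with hS
  have hlenS : S.length = k := by
    rw [hS, PySem.List.length_sorted, List.length_take]; omega
  have hdecomp : S.take (k - 3) ++ [t0, t1, t2] = S := by
    conv_rhs => rw [← List.take_append_drop (k - 3) S]
    rw [hs]
  have hlenU : (S.take (k - 3)).length = k - 3 := by
    rw [List.length_take]; omega
  have hpw : (S.take (k - 3) ++ [t0, t1, t2]).Pairwise (· ≤ ·) := by
    rw [hdecomp, hS]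
    have := PySem.List.sorted_pairwise (a.take k) (fun y : Int => y)
    simpa using this
  rw [htake, sorted_append_singleton, ← hS, ← hdecomp]
  have hidx : k + 1 - 3 = (S.take (k - 3)).length + 1 := by omega
  rw [hidx, drop_insertBy _ _ _ _ _ hpw]
  have hlist := (bupd_spec t0 t1 t2 a[k] h01 h12).1
  rw [hb] at hlist
  exact hlist.symm

-- the main loop invariant
lemma loop_eq (a : List Int) (hpre : Pre_solve a) :
    ∀ m k, 3 ≤ k → k + m = a.length →
    ∀ t0 t1 t2 heap res, t0 ≤ t1 → t1 ≤ t2 →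
    (heap = [t0, t1, t2] ∨ heap = [t0, t2, t1]) →
    (PySem.List.sorted (a.take k) (fun y => y)).drop (k - 3) = [t0, t1, t2] →
    res ≠ [] → res.getLast? = some (t0 * t1 * t2) →
    ((PySem.List.pyRange (k : Int) (a.length : Int)).foldl (solveStep a) (heap, res)).2 =
      ((a.drop k).foldl altStep ((t0, t1, t2), res)).2 := by
  intro m
  induction m with
  | zero =>
    intro k hk3 hkm t0 t1 t2 heap res _ _ _ _ _ _
    rw [PySem.List.pyRange_one_eq_nil (by exact_mod_cast Nat.le_of_eq (by omega)),
      List.drop_of_length_le (by omega)]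
    rfl
  | succ m ih =>
    intro k hk3 hkm t0 t1 t2 heap res h01 h12 hh hsorted hne hlast
    have hklen : k < a.length := by omega
    rw [PySem.List.pyRange_one_cons (by exact_mod_cast hklen), List.drop_eq_getElem_cons hklen]
    simp only [List.foldl_cons]
    have hga : PySem.List.pyGetD a (k : Int) 0 = a[k] := by
      rw [PySem.List.pyGetD_natCast, List.getD_eq_getElem?_getD, List.getElem?_eq_getElem hklen]
      rfl
    have hheap0 : PySem.List.pyGetD heap 0 0 = t0 := by
      rcases hh with rfl | rfl <;> rw [PySem.List.pyGetD_zero_cons]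
    have hhlen : heap.length = 3 := by rcases hh with rfl | rfl <;> rfl
    have hlast' : PySem.List.pyGetD res (-1) 0 = t0 * t1 * t2 := by
      rw [PySem.List.pyGetD_neg_one _ _ hne]
      have := List.getLast?_eq_some_getLast hne
      rw [hlast] at this
      exact (Option.some_injective _ this).symm
    obtain ⟨⟨s0, s1, s2⟩, hb⟩ : ∃ s, bupd t0 t1 t2 a[k] = s := ⟨_, rfl⟩
    have hspec := bupd_spec t0 t1 t2 a[k] h01 h12
    rw [hb] at hspec
    have hsorted' := sorted_take_step a k hk3 hklen t0 t1 t2 s0 s1 s2 h01 h12 hsorted hb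
    have haltstep : altStep ((t0, t1, t2), res) a[k] =
        ((s0, s1, s2), res ++ [s0 * s1 * s2]) := by
      simp only [altStep, hb]
    by_cases hx : t0 < a[k]
    · -- the branch that replaces the heap minimum
      have ht0 : t0 ≠ 0 := by
        intro h0
        have hmem : k ∈ List.range a.length := List.mem_range.mpr hklen
        have hget : (PySem.List.sorted (a.take k) (fun x => x)).getD (k - 3) 0 = 0 := by
          rw [List.getD_eq_getElem?_getD, ← List.head?_drop, hsorted]
          simp [h0]
        have := hpre k hmem hk3 hget
        rw [List.getD_eq_getElem?_getD, List.getElem?_eq_getElem hklen] at this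
        simp at this
        omega
      have hdiv : PySem.Int.floordiv (t0 * t1 * t2) t0 = t1 * t2 := by
        show (t0 * t1 * t2).fdiv t0 = t1 * t2
        rw [mul_assoc]
        exact Int.mul_fdiv_cancel_left _ ht0
      have hpp := heappushpop_bupd t0 t1 t2 a[k] s0 s1 s2 h12 hb heap hh
      have hstep : solveStep a (heap, res) (k : Int) =
          (heappushpop heap a[k], res ++ [s0 * s1 * s2]) := by
        simp only [solveStep, hga, hheap0, hhlen, hlast']
        rw [if_pos ⟨hx, by omega⟩, hdiv]
        rw [hspec.2.2.2 hx]
      rw [hstep, haltstep]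
      have hcast : ((k : Int) + 1) = ((k + 1 : Nat) : Int) := by push_cast; ring
      rw [hcast]
      exact ih (k + 1) (by omega) (by omega) s0 s1 s2 _ _ hspec.2.1 hspec.2.2.1 hpp hsorted'
        (by simp) (by rw [List.getLast?_concat])
    · -- the element does not beat the heap minimum
      have hbid : bupd t0 t1 t2 a[k] = (t0, t1, t2) := by unfold bupd; rw [if_neg hx]
      have haltstep' : altStep ((t0, t1, t2), res) a[k] =
          ((t0, t1, t2), res ++ [t0 * t1 * t2]) := by
        simp only [altStep, hbid]
      have hsorted'' := sorted_take_step a k hk3 hklen t0 t1 t2 t0 t1 t2 h01 h12 hsorted hbid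
      have hstep : solveStep a (heap, res) (k : Int) = (heap, res ++ [t0 * t1 * t2]) := by
        simp only [solveStep, hga, hheap0, hlast']
        rw [if_neg (by omega)]
      rw [hstep, haltstep']
      have hcast : ((k : Int) + 1) = ((k + 1 : Nat) : Int) := by push_cast; ring
      rw [hcast]
      exact ih (k + 1) (by omega) (by omega) t0 t1 t2 _ _ h01 h12 hh hsorted''
        (by simp) (by rw [List.getLast?_concat])

-- the initial heap and the sorted first three elements
lemma init3 (a0 a1 a2 : Int) :
    ∃ t0 t1 t2, PySem.List.sorted [a0, a1, a2] (fun y => y) = [t0, t1, t2] ∧ t0 ≤ t1 ∧ t1 ≤ t2 ∧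
      (heappush (heappush (heappush [] a0) a1) a2 = [t0, t1, t2] ∨
       heappush (heappush (heappush [] a0) a1) a2 = [t0, t2, t1]) ∧
      a0 * a1 * a2 = t0 * t1 * t2 := by
  rw [heappush3]
  have hs : PySem.List.sorted [a0, a1, a2] (fun y => y) =
      PySem.List.insertBy (fun a b => decide (a < b)) a2
        (PySem.List.insertBy (fun a b => decide (a < b)) a1 [a0]) := by
    rw [PySem.List.sorted_eq_foldl_insertBy]; rfl
  by_cases h1 : a1 < a0
  · by_cases h2 : a2 < a1
    · exact ⟨a2, a1, a0, by rw [hs]; simp [PySem.List.insertBy, h1, h2],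
        by omega, by omega, by simp [h1, h2], by ring⟩
    · by_cases h3 : a2 < a0
      · exact ⟨a1, a2, a0, by rw [hs]; simp [PySem.List.insertBy, h1, h2, h3],
          by omega, by omega, by simp [h1, h2], by ring⟩
      · exact ⟨a1, a0, a2, by rw [hs]; simp [PySem.List.insertBy, h1, h2, h3],
          by omega, by omega, by simp [h1, h2], by ring⟩
  · by_cases h3 : a2 < a0
    · exact ⟨a2, a0, a1, by rw [hs]; simp [PySem.List.insertBy, h1, h3],
        by omega, by omega, by simp [h1, h3], by ring⟩
    · by_cases h2 : a2 < a1
      · exact ⟨a0, a2, a1, by rw [hs]; simp [PySem.List.insertBy, h1, h2, h3],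
          by omega, by omega, by simp [h1, h3], by ring⟩
      · exact ⟨a0, a1, a2, by rw [hs]; simp [PySem.List.insertBy, h1, h2, h3],
          by omega, by omega, by simp [h1, h3], by ring⟩

-- ===== VERDICT (by name: the statement is the Claim_ definition above) =====
theorem solve_spec : Claim_equal_solve := by
  intro a _ hpre
  unfold Spec_solve solve solve_alt
  by_cases hlen : a.length < 3
  · rw [if_pos hlen, if_pos hlen]
  · rcases a with _ | ⟨a0, _ | ⟨a1, _ | ⟨a2, rest⟩⟩⟩
    · simp at hlen
    · simp at hlen
    · simp at hlen
    rw [if_neg hlen, if_neg hlen]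
    obtain ⟨t0, t1, t2, hsort, h01, h12, hh, hprod⟩ := init3 a0 a1 a2
    have hs3 : (a0 :: a1 :: a2 :: rest).take 3 = [a0, a1, a2] := rfl
    have hg0 : PySem.List.pyGetD (a0 :: a1 :: a2 :: rest) 0 0 = a0 := by simp [pysem]
    have hg1 : PySem.List.pyGetD (a0 :: a1 :: a2 :: rest) 1 0 = a1 := by simp [pysem]
    have hg2 : PySem.List.pyGetD (a0 :: a1 :: a2 :: rest) 2 0 = a2 := by simp [pysem]
    simp only [hs3, hsort, hg0, hg1, hg2, hprod]
    have hmain := loop_eq (a0 :: a1 :: a2 :: rest) hpre ((a0 :: a1 :: a2 :: rest).length - 3) 3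
      (by omega) (by omega) t0 t1 t2
      (heappush (heappush (heappush [] a0) a1) a2) [-1, -1, t0 * t1 * t2]
      h01 h12 hh (by rw [hs3, hsort]; rfl) (by simp) (by rfl)
    simpa using hmain
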